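-- pv_equiv track=rewrite | github.com/AbdelrahmanKhaled95/BScWSD | wsd/lesk_algorithms.py | compare_overlaps_simple_lesk
-- ===== SOURCE A (Python) =====
-- def compare_overlaps_simple_lesk(sentence, synsets_sign):
--
--     overlaplen_synsets = [] # a tuple of (len(overlap), synset).
--     for ss in synsets_sign:
--         overlaps = set(synsets_sign[ss]).intersection(sentence)
--         overlaplen_synsets.append((len(overlaps), ss))
--
--     # Rank synsets from highest to lowest overlap.
--     ranked_synsets = sorted(overlaplen_synsets, reverse=True)
--
--     # Returns only the best sense.
--     return ranked_synsets[0]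
--
--     """
--     Returns a synsets_signatures dictionary that includes signature synset of a
--     sense consisting of its:
--     (i)   definition
--     (ii)  example sentences
--     (iii) lemmas
--     """
-- ===== SOURCE B (Python) =====
-- def compare_overlaps_simple_lesk(sentence, synsets_sign):
--     # Single pass: keep the running best (overlap_count, synset) tuple,
--     # updating only on a strictly greater tuple (so ties keep the earlier winner,
--     # exactly as sorted(..., reverse=True)[0] does).
--     best = None
--     for ss in synsets_sign:
--         cand = (len(set(synsets_sign[ss]).intersection(sentence)), ss)
--         if best is None or cand > best:
--             best = cand
--     return best
-- ===== Notes on version B (the rewrite author's own statement) =====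
-- stated objective: idiomatic
-- what changed: B replaces build-a-list-of-(count,synset)-tuples, full descending sort, take-first by a single running-best scan over the synsets that never materialises or sorts the tuple list.
import Mathlib
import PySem

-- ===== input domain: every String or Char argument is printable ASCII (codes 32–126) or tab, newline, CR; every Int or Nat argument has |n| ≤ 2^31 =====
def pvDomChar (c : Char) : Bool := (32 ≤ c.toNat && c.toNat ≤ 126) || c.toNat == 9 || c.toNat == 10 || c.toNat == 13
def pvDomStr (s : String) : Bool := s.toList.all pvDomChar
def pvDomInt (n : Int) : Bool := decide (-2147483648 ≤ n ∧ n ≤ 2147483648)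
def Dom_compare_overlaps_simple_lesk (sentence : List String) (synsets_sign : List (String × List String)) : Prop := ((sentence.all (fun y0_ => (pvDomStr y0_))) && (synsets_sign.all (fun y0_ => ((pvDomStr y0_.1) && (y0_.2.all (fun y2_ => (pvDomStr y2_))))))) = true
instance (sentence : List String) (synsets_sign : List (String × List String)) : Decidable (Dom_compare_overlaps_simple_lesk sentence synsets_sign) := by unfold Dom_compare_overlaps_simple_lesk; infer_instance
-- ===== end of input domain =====

-- B replaces build-list / sort-descending / take-first by a single running-best scan (idiomatic, no sort).


-- ===== PORT A =====
-- for ss in synsets_sign: append (len(set(synsets_sign[ss]) & sentence), ss); sort descending; take [0]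
def compare_overlaps_simple_lesk (sentence : List String) (synsets_sign : List (String × List String)) : Int × String :=
  let d := PySem.Dict.ofList synsets_sign
  let overlaplen_synsets : List (Int × String) :=
    d.keys.foldl (fun acc ss =>
      let overlaps := PySem.Set.inter (PySem.Set.ofList (d.getD ss [])) sentence
      acc ++ [(PySem.Set.len overlaps, ss)]) []
  let ranked_synsets := PySem.List.sorted2 overlaplen_synsets Prod.fst Prod.snd true
  PySem.List.pyGetD ranked_synsets 0 (0, "")   -- total form of ranked_synsets[0]; Pre_ excludes the empty dict (IndexError)

-- ===== PORT B =====
def compare_overlaps_simple_lesk_alt (sentence : List String) (synsets_sign : List (String × List String)) : Int × String :=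
  let d := PySem.Dict.ofList synsets_sign
  let best :=
    d.keys.foldl (fun (best : Option (Int × String)) ss =>
      let cand : Int × String := (PySem.Set.len (PySem.Set.inter (PySem.Set.ofList (d.getD ss [])) sentence), ss)
      match best with
      | none => some cand
      | some b => if b.1 < cand.1 ∨ (b.1 = cand.1 ∧ b.2 < cand.2) then some cand else some b) none
  best.getD (0, "")   -- Pre_ excludes the empty dict, where Source B returns None (no tuple)

-- ===== PRECONDITION & SPEC =====
-- Pre_ excludes only the empty dict, on which A raises IndexError (and B returns None, not a tuple).
def Pre_compare_overlaps_simple_lesk (sentence : List String) (synsets_sign : List (String × List String)) : Prop := synsets_sign ≠ []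
instance (sentence : List String) (synsets_sign : List (String × List String)) : Decidable (Pre_compare_overlaps_simple_lesk sentence synsets_sign) := by unfold Pre_compare_overlaps_simple_lesk; infer_instance
def pvWitness_compare_overlaps_simple_lesk : List String × (List (String × List String)) := (["cat", "dog"], [("s1", ["cat", "x"]), ("s2", ["cat", "dog"])])
def Spec_compare_overlaps_simple_lesk (sentence : List String) (synsets_sign : List (String × List String)) (out : Int × String) : Prop := out = compare_overlaps_simple_lesk_alt sentence synsets_sign
instance (sentence : List String) (synsets_sign : List (String × List String)) (out : Int × String) : Decidable (Spec_compare_overlaps_simple_lesk sentence synsets_sign out) := by unfold Spec_compare_overlaps_simple_lesk; infer_instance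

-- ===== CLAIM (what is proved, stated in full; the proofs are below) =====
def Claim_equal_compare_overlaps_simple_lesk : Prop := ∀ (sentence : List String) (synsets_sign : List (String × List String)), Dom_compare_overlaps_simple_lesk sentence synsets_sign → Pre_compare_overlaps_simple_lesk sentence synsets_sign → Spec_compare_overlaps_simple_lesk sentence synsets_sign (compare_overlaps_simple_lesk sentence synsets_sign)

-- ===== LEMMAS AND PROOFS =====

-- the running-best step (first maximal element under strict lexicographic improvement)
def pvStep {P : Type} (lt : P → P → Bool) (b : Option P) (x : P) : Option P :=
  match b with
  | none => some x
  | some h => if lt h x then some x else some h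

theorem head?_insertBy {P : Type} (lt : P → P → Bool) (x : P) (acc : List P) :
    (PySem.List.insertBy (fun a b => lt b a) x acc).head? = pvStep lt acc.head? x := by
  cases acc with
  | nil => rfl
  | cons y ys =>
    simp only [PySem.List.insertBy, pvStep, List.head?_cons]
    by_cases h : lt y x
    · simp [h]
    · simp [h]

theorem head?_foldl_insertBy {P : Type} (lt : P → P → Bool) (xs : List P) (acc : List P) :
    (xs.foldl (fun a x => PySem.List.insertBy (fun a b => lt b a) x a) acc).head? =
      xs.foldl (pvStep lt) acc.head? := by
  induction xs generalizing acc with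
  | nil => rfl
  | cons x t ih =>
    simp only [List.foldl_cons]
    rw [ih, head?_insertBy]

-- ===== VERDICT (by name: the statement is the Claim_ definition above) =====
theorem compare_overlaps_simple_lesk_spec : Claim_equal_compare_overlaps_simple_lesk := by
  unfold Claim_equal_compare_overlaps_simple_lesk
  intro sentence synsets_sign _ _
  unfold Spec_compare_overlaps_simple_lesk
  unfold compare_overlaps_simple_lesk compare_overlaps_simple_lesk_alt
  simp only [PySem.List.foldl_append_singleton_eq_map, List.nil_append]
  set d := PySem.Dict.ofList synsets_sign with hd
  set f : String → Int × String := fun ss =>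
    (PySem.Set.len (PySem.Set.inter (PySem.Set.ofList (d.getD ss [])) sentence), ss) with hf
  set lt : Int × String → Int × String → Bool := fun h c =>
    decide (h.1 < c.1) || !decide (c.1 < h.1) && decide (h.2 < c.2) with hlt
  have hsorted : PySem.List.sorted2 (d.keys.map f) Prod.fst Prod.snd true =
      (d.keys.map f).foldl (fun a x => PySem.List.insertBy (fun a b => lt b a) x a) [] := by
    rfl
  have hstep : ∀ (b : Option (Int × String)) (c : Int × String),
      pvStep lt b c =
      (match b with
        | none => some c
        | some h => if h.1 < c.1 ∨ (h.1 = c.1 ∧ h.2 < c.2) then some c else some h) := by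
    intro b c
    cases b with
    | none => rfl
    | some h =>
      have hiff : lt h c = true ↔ (h.1 < c.1 ∨ (h.1 = c.1 ∧ h.2 < c.2)) := by
        rw [hlt]
        simp only [Bool.or_eq_true, Bool.and_eq_true, Bool.not_eq_true',
          decide_eq_true_iff, decide_eq_false_iff_not]
        constructor
        · rintro (h1 | ⟨h2, h3⟩)
          · exact Or.inl h1
          · by_cases h1 : h.1 < c.1
            · exact Or.inl h1
            · exact Or.inr ⟨le_antisymm (not_lt.mp h2) (not_lt.mp h1), h3⟩
        · rintro (h1 | ⟨he, h3⟩)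
          · exact Or.inl h1
          · exact Or.inr ⟨by rw [he]; exact lt_irrefl _, h3⟩
      simp only [pvStep]
      by_cases hc : h.1 < c.1 ∨ (h.1 = c.1 ∧ h.2 < c.2)
      · rw [if_pos (hiff.mpr hc), if_pos hc]
      · rw [if_neg (fun hb => hc (hiff.mp hb)), if_neg hc]
  have key : ∀ (ks : List String) (b : Option (Int × String)),
      ks.foldl (fun x y => pvStep lt x (f y)) b =
      ks.foldl (fun best ss =>
        match best with
        | none => some (f ss)
        | some bb => if bb.1 < (f ss).1 ∨ (bb.1 = (f ss).1 ∧ bb.2 < (f ss).2)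
            then some (f ss) else some bb) b := by
    intro ks
    induction ks with
    | nil => intro b; rfl
    | cons x t ih =>
      intro b
      simp only [List.foldl_cons]
      rw [hstep, ih]
  rw [PySem.List.pyGetD, PySem.List.pyGet?_zero]
  rw [show ∀ (l : List (Int × String)), l[0]? = l.head? from fun l => by cases l <;> rfl]
  rw [hsorted, head?_foldl_insertBy, List.foldl_map, List.head?_nil]
  congr 1
  exact key d.keys none
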